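-- pv_equiv track=rewrite | github.com/arlindolins/Otimizando-Domin- | motor_de_jogo.py | jogador_com_maior_duplo
-- ===== SOURCE A (Python) =====
-- def jogador_com_maior_duplo(maos):
--     maior_duplo = -1
--     jogador_inicial = None
--     for jogador, mao in maos.items():
--         for peca in mao:
--             if peca[0] == peca[1] and peca[0] > maior_duplo:
--                 maior_duplo = peca[0]
--                 jogador_inicial = jogador
--
--     return jogador_inicial, maior_duplo
-- ===== SOURCE B (Python) =====
-- def jogador_com_maior_duplo(maos):
--     bests = []
--     for jogador, mao in maos.items():
--         duplos = [a for a, b in mao if a == b]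
--         if duplos:
--             bests.append((jogador, max(duplos)))
--     melhor = (None, -1)
--     for jogador, d in bests:
--         if d > melhor[1]:
--             melhor = (jogador, d)
--     return melhor
-- ===== Notes on version B (the rewrite author's own statement) =====
-- stated objective: alternative
-- what changed: Replaces A's single nested scan carrying global (best,player) state by a two-phase decomposition: first reduce each hand to its best double via a comprehension+max, then a separate selection pass over the reduced (player,best) list with first-wins tie-breaking.
import Mathlib
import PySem

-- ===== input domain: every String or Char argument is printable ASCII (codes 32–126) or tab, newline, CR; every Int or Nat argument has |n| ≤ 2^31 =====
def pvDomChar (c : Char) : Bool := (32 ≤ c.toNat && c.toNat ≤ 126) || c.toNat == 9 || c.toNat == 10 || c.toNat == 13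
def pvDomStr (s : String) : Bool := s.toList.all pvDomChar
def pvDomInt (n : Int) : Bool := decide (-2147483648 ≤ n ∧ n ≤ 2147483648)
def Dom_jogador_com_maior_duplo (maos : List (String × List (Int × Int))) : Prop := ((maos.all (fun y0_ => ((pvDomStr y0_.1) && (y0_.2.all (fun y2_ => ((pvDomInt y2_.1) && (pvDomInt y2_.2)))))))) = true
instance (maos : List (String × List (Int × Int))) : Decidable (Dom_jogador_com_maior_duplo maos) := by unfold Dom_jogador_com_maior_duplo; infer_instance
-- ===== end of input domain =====

-- B replaces A's single nested scan with a two-phase decomposition (reduce each hand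
-- to its best double, then a separate selection pass); same cost, alternative structure.

-- ===== PORT A =====
-- inner loop body of A: update (maior_duplo, jogador_inicial) with one piece
def pvAstep (jog : String) (st : Int × Option String) (peca : Int × Int) : Int × Option String :=
  if peca.1 = peca.2 ∧ peca.1 > st.1 then (peca.1, some jog) else st

def jogador_com_maior_duplo (maos : List (String × List (Int × Int))) : Option String × Int :=
  let st := maos.foldl (fun st p => p.2.foldl (pvAstep p.1) st) ((-1 : Int), (none : Option String))
  (st.2, st.1)

-- ===== PORT B =====
-- the comprehension [a for a, b in mao if a == b]
def pvDoubles (mao : List (Int × Int)) : List Int :=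
  mao.filterMap (fun q => if q.1 = q.2 then some q.1 else none)

-- phase 1 body: append (jogador, max(duplos)) when the hand has a double
def pvBstep (acc : List (String × Int)) (p : String × List (Int × Int)) : List (String × Int) :=
  match PySem.List.max? (pvDoubles p.2) (fun x => x) with
  | some m => acc ++ [(p.1, m)]
  | none => acc

-- phase 2 body: keep the first player with the strictly largest best double
def pvSel (melhor : Option String × Int) (jd : String × Int) : Option String × Int :=
  if jd.2 > melhor.2 then (some jd.1, jd.2) else melhor

def jogador_com_maior_duplo_alt (maos : List (String × List (Int × Int))) : Option String × Int :=
  let bests := maos.foldl pvBstep []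
  bests.foldl pvSel ((none : Option String), (-1 : Int))

-- ===== PRECONDITION & SPEC =====
def Spec_jogador_com_maior_duplo (maos : List (String × List (Int × Int))) (out : Option String × Int) : Prop := out = jogador_com_maior_duplo_alt maos
instance (maos : List (String × List (Int × Int))) (out : Option String × Int) : Decidable (Spec_jogador_com_maior_duplo maos out) := by unfold Spec_jogador_com_maior_duplo; infer_instance

-- ===== CLAIM (what is proved, stated in full; the proofs are below) =====
def Claim_equal_jogador_com_maior_duplo : Prop := ∀ (maos : List (String × List (Int × Int))), Dom_jogador_com_maior_duplo maos → Spec_jogador_com_maior_duplo maos (jogador_com_maior_duplo maos)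

-- ===== LEMMAS AND PROOFS =====

theorem foldl_max_max (l : List Int) : ∀ (a b : Int), l.foldl max (max a b) = max a (l.foldl max b) := by
  induction l with
  | nil => intro a b; simp
  | cons c t ih =>
    intro a b
    simp only [List.foldl_cons, max_assoc]
    exact ih a (max b c)

theorem le_foldl_max' (l : List Int) : ∀ (b : Int), b ≤ l.foldl max b := by
  induction l with
  | nil => intro b; simp
  | cons c t ih =>
    intro b
    simp only [List.foldl_cons]
    exact le_trans (le_max_left b c) (ih (max b c))

-- A's inner loop over one hand, characterised by the running max of the hand's doubles
theorem inner_char (jog : String) (mao : List (Int × Int)) : ∀ (m : Int) (j : Option String),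
    mao.foldl (pvAstep jog) (m, j) =
      (if (pvDoubles mao).foldl max m > m then ((pvDoubles mao).foldl max m, some jog) else (m, j)) := by
  induction mao with
  | nil =>
    intro m j
    simp [pvDoubles]
  | cons q t ih =>
    obtain ⟨a, b⟩ := q
    intro m j
    by_cases hq : a = b
    · subst hq
      have hcons : pvDoubles ((a, a) :: t) = a :: pvDoubles t := by
        simp [pvDoubles]
      by_cases hgt : a > m
      · have hst : pvAstep jog (m, j) (a, a) = (a, some jog) := by
          simp [pvAstep, hgt]
        have hmax : max m a = a := max_eq_right (le_of_lt hgt)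
        rw [List.foldl_cons, hst, ih a (some jog), hcons, List.foldl_cons, hmax]
        have hle : a ≤ (pvDoubles t).foldl max a := le_foldl_max' _ _
        by_cases h2 : (pvDoubles t).foldl max a > a
        · rw [if_pos h2, if_pos (lt_trans hgt h2)]
        · have heq : (pvDoubles t).foldl max a = a := le_antisymm (not_lt.mp h2) hle
          rw [if_neg h2, heq, if_pos hgt]
      · have hst : pvAstep jog (m, j) (a, a) = (m, j) := by
          simp [pvAstep, hgt]
        have hmax : max m a = m := max_eq_left (not_lt.mp hgt)
        rw [List.foldl_cons, hst, ih m j, hcons, List.foldl_cons, hmax]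
    · have hst : pvAstep jog (m, j) (a, b) = (m, j) := by
        simp [pvAstep, hq]
      have hcons : pvDoubles ((a, b) :: t) = pvDoubles t := by
        simp [pvDoubles, hq]
      rw [List.foldl_cons, hst, ih m j, hcons]

-- pvBstep appends an entry (or nothing) at the back
def pvEnt (p : String × List (Int × Int)) : List (String × Int) :=
  match PySem.List.max? (pvDoubles p.2) (fun x => x) with
  | some m => [(p.1, m)]
  | none => []

theorem pvBstep_eq (acc : List (String × Int)) (p : String × List (Int × Int)) :
    pvBstep acc p = acc ++ pvEnt p := by
  unfold pvBstep pvEnt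
  cases PySem.List.max? (pvDoubles p.2) (fun x => x) <;> simp

theorem build_acc (l : List (String × List (Int × Int))) : ∀ (acc : List (String × Int)),
    l.foldl pvBstep acc = acc ++ l.foldl pvBstep [] := by
  induction l with
  | nil => intro acc; simp
  | cons p t ih =>
    intro acc
    simp only [List.foldl_cons, pvBstep_eq]
    rw [ih (acc ++ pvEnt p), ih ([] ++ pvEnt p)]
    simp

-- main invariant: A's running state, swapped, equals B's selection fold over the built list
theorem main_inv (maos : List (String × List (Int × Int))) : ∀ (m : Int) (j : Option String),
    (((maos.foldl (fun st p => p.2.foldl (pvAstep p.1) st) (m, j)).2,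
      (maos.foldl (fun st p => p.2.foldl (pvAstep p.1) st) (m, j)).1) : Option String × Int) =
      (maos.foldl pvBstep []).foldl pvSel (j, m) := by
  induction maos with
  | nil => intro m j; simp
  | cons p t ih =>
    intro m j
    simp only [List.foldl_cons, pvBstep_eq, List.nil_append]
    rw [build_acc t (pvEnt p), List.foldl_append]
    rw [inner_char p.1 p.2 m j]
    cases hD : pvDoubles p.2 with
    | nil =>
      have hnone : PySem.List.max? (pvDoubles p.2) (fun x => x) = none := by
        rw [hD]; exact (PySem.List.max?_eq_none_iff _ _).mpr rfl
      simp only [pvEnt, hnone, List.foldl_nil, gt_iff_lt, lt_irrefl, if_false]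
      exact ih m j
    | cons x dt =>
      have hsome : PySem.List.max? (pvDoubles p.2) (fun y => y) = some (dt.foldl max x) := by
        rw [hD]; exact PySem.List.max?_id_cons x dt
      simp only [pvEnt, hsome, List.foldl_cons, List.foldl_nil, pvSel]
      rw [foldl_max_max dt m x]
      by_cases hgt : dt.foldl max x > m
      · have hmx : max m (dt.foldl max x) = dt.foldl max x := max_eq_right (le_of_lt hgt)
        rw [hmx, if_pos hgt, if_pos hgt]
        exact ih (dt.foldl max x) (some p.1)
      · have hmx : max m (dt.foldl max x) = m := max_eq_left (not_lt.mp hgt)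
        rw [hmx, if_neg (lt_irrefl m), if_neg hgt]
        exact ih m j

-- ===== VERDICT (by name: the statement is the Claim_ definition above) =====
theorem jogador_com_maior_duplo_spec : Claim_equal_jogador_com_maior_duplo := by
  intro maos _
  unfold Spec_jogador_com_maior_duplo jogador_com_maior_duplo jogador_com_maior_duplo_alt
  simpa using main_inv maos (-1) none
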